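-- pv_equiv track=rewrite | github.com/olegkizyma008-rgb/System | tui/keybindings.py | _settings_next_selectable_index
-- ===== SOURCE A (Python) =====
-- from typing import Any, Callable, List, Sequence, Tuple
--
-- def _is_section_item(item: Any) -> bool:
--     return isinstance(item, tuple) and len(item) == 3 and item[2] == "section"
--
-- def _settings_next_selectable_index(items: List[Any], start: int, direction: int) -> int:
--     if not items:
--         return 0
--     idx = max(0, min(int(start), len(items) - 1))
--     step = 1 if direction >= 0 else -1
--
--     # Search for the next non-section item in the given direction
--     curr = idx
--     while 0 <= curr < len(items):
--         if not _is_section_item(items[curr]):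
--             return curr
--         curr += step
--
--     # Fallback: scan the entire list from the appropriate end
--     indices = range(len(items)) if step > 0 else range(len(items) - 1, -1, -1)
--     for i in indices:
--         if not _is_section_item(items[i]):
--             return i
--
--     return 0
-- ===== SOURCE B (Python) =====
-- def _is_section_item(item):
--     return isinstance(item, tuple) and len(item) == 3 and item[2] == "section"
--
-- def _settings_next_selectable_index(items, start, direction):
--     # Different decomposition: compute the sorted list of selectable (non-section)
--     # indices once, then answer by order statistics on that set — nearest selectable
--     # index at-or-after idx (forward) / at-or-before idx (backward), wrapping to the
--     # first / last selectable index when that side is empty.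
--     if not items:
--         return 0
--     sel = [i for i, it in enumerate(items) if not _is_section_item(it)]
--     if not sel:
--         return 0
--     idx = max(0, min(int(start), len(items) - 1))
--     if direction >= 0:
--         after = [i for i in sel if i >= idx]
--         return after[0] if after else sel[0]
--     else:
--         before = [i for i in sel if i <= idx]
--         return before[-1] if before else sel[-1]
-- ===== Notes on version B (the rewrite author's own statement) =====
-- stated objective: alternative
-- what changed: Instead of scanning directionally with a stepping cursor plus a fallback full sweep, B builds the sorted list of selectable (non-section) indices once and answers by order statistics on it: first selectable index >= idx (forward) / last <= idx (backward), wrapping to the first/last selectable index.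
import Mathlib
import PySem

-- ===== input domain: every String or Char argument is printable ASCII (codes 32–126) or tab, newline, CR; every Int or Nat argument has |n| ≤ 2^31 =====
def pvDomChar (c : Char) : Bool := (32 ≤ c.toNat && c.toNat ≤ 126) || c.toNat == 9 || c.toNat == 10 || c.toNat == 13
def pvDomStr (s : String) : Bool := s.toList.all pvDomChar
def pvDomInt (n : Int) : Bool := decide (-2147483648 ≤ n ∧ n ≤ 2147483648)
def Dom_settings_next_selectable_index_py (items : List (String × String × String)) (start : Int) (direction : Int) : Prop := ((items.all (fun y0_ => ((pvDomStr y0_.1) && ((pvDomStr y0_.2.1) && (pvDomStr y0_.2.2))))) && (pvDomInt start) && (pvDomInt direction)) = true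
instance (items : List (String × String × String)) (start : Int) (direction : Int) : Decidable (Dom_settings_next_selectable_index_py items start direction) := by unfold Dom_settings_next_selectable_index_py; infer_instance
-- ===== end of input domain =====

-- B replaces A's stepping cursor + fallback sweep by computing the selectable index
-- set once and answering with order statistics on it ('alternative').

-- ===== PORT A =====
-- _is_section_item: under the typed domain every element IS a 3-tuple, so the
-- isinstance/len tests are identically true and only the item[2] == "section" test remains.
def pvIsSection (it : String × String × String) : Bool := it.2.2 == "section"

-- the 'while 0 <= curr < len(items)' loop of A; fuel bounds the iteration count
-- (fuel = len(items)+1 always suffices, proved in the lemmas below)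
def pvLoopA (items : List (String × String × String)) (step : Int) : Nat → Int → Option Int
  | 0, _ => none
  | fuel+1, curr =>
    if 0 ≤ curr ∧ curr < (items.length : Int) then
      if !(pvIsSection (PySem.List.pyGetD items curr ("", "", ""))) then some curr
      else pvLoopA items step fuel (curr + step)
    else none

def settings_next_selectable_index_py (items : List (String × String × String)) (start : Int) (direction : Int) : Int :=
  if items = [] then 0
  else
    let n : Int := (items.length : Int)
    let idx : Int := max 0 (min start (n - 1))
    let step : Int := if direction ≥ 0 then 1 else -1
    match pvLoopA items step (items.length + 1) idx with
    | some c => c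
    | none =>
      let indices : List Int :=
        if step > 0 then PySem.List.pyRange 0 n 1 else PySem.List.pyRange (n - 1) (-1) (-1)
      match indices.find? (fun i => !(pvIsSection (PySem.List.pyGetD items i ("", "", "")))) with
      | some i => i
      | none => 0

-- ===== PORT B =====
def settings_next_selectable_index_py_alt (items : List (String × String × String)) (start : Int) (direction : Int) : Int :=
  if items = [] then 0
  else
    let sel : List Int := ((PySem.List.enumerate items 0).filter (fun e => !(pvIsSection e.2))).map (fun e => e.1)
    if sel = [] then 0
    else
      let idx : Int := max 0 (min start ((items.length : Int) - 1))
      if direction ≥ 0 then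
        let after := sel.filter (fun i => idx ≤ i)
        match after.head? with
        | some a => a
        | none => sel.headD 0
      else
        let before := sel.filter (fun i => i ≤ idx)
        match before.getLast? with
        | some b => b
        | none => sel.getLastD 0

-- ===== PRECONDITION & SPEC =====
def Spec_settings_next_selectable_index_py (items : List (String × String × String)) (start : Int) (direction : Int) (out : Int) : Prop := out = settings_next_selectable_index_py_alt items start direction
instance (items : List (String × String × String)) (start : Int) (direction : Int) (out : Int) : Decidable (Spec_settings_next_selectable_index_py items start direction out) := by unfold Spec_settings_next_selectable_index_py; infer_instance

-- ===== CLAIM (what is proved, stated in full; the proofs are below) =====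
def Claim_equal_settings_next_selectable_index_py : Prop := ∀ (items : List (String × String × String)) (start : Int) (direction : Int), Dom_settings_next_selectable_index_py items start direction → Spec_settings_next_selectable_index_py items start direction (settings_next_selectable_index_py items start direction)

-- ===== LEMMAS AND PROOFS =====

-- A's forward while-loop is the first match over range(curr, n)
theorem pvLoopA_forward (items : List (String × String × String)) (fuel : Nat) (curr : Int)
    (h0 : 0 ≤ curr) (hf : (items.length : Int) ≤ curr + fuel) :
    pvLoopA items 1 fuel curr
      = (PySem.List.pyRange curr (items.length : Int) 1).find?
          (fun i => !(pvIsSection (PySem.List.pyGetD items i ("", "", "")))) := by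
  induction fuel generalizing curr with
  | zero =>
    rw [PySem.List.pyRange_one_eq_nil (by simpa using hf)]
    simp [pvLoopA]
  | succ f ih =>
    by_cases hlt : curr < (items.length : Int)
    · rw [PySem.List.pyRange_one_cons hlt]
      simp only [pvLoopA, List.find?_cons]
      rw [if_pos ⟨h0, hlt⟩]
      by_cases hp : pvIsSection (PySem.List.pyGetD items curr ("", "", "")) = true
      · simp [hp]
        exact ih (curr + 1) (by omega) (by push_cast at hf ⊢; omega)
      · simp [hp]
    · rw [PySem.List.pyRange_one_eq_nil (by omega)]
      simp [pvLoopA, hlt]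

-- A's backward while-loop is the first match over range(curr, -1, -1)
theorem pvLoopA_backward (items : List (String × String × String)) (fuel : Nat) (curr : Int)
    (hn : curr < (items.length : Int)) (hf : curr < (fuel : Int)) :
    pvLoopA items (-1) fuel curr
      = (PySem.List.pyRange curr (-1) (-1)).find?
          (fun i => !(pvIsSection (PySem.List.pyGetD items i ("", "", "")))) := by
  induction fuel generalizing curr with
  | zero =>
    rw [PySem.List.pyRange_neg_one_eq_nil (by simpa using by omega)]
    simp [pvLoopA]
  | succ f ih =>
    by_cases h0 : 0 ≤ curr
    · rw [PySem.List.pyRange_neg_one_cons (by omega)]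
      simp only [pvLoopA, List.find?_cons]
      rw [if_pos ⟨h0, hn⟩]
      by_cases hp : pvIsSection (PySem.List.pyGetD items curr ("", "", "")) = true
      · simp [hp]
        exact ih (curr + -1) (by omega) (by push_cast at hf ⊢; omega)
      · simp [hp]
    · rw [PySem.List.pyRange_neg_one_eq_nil (by omega)]
      simp [pvLoopA, h0]

-- find? is head? of filter
theorem pv_find?_eq_head?_filter {α : Type} (p : α → Bool) (l : List α) :
    l.find? p = (l.filter p).head? := by
  induction l with
  | nil => simp
  | cons x xs ih =>
    rw [List.find?_cons, List.filter_cons]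
    cases p x
    · simp only [Bool.false_eq_true, if_false]
      exact ih
    · simp only [if_true]
      rfl

-- range(0,b) filtered to i ≥ a is range(a,b)
theorem pv_filter_ge (a b : Int) (h0 : 0 ≤ a) :
    (PySem.List.pyRange 0 b 1).filter (fun i => decide (a ≤ i)) = PySem.List.pyRange a b 1 := by
  by_cases hab : a ≤ b
  · rw [PySem.List.pyRange_one_append 0 a b h0 hab, List.filter_append]
    have h1 : (PySem.List.pyRange 0 a 1).filter (fun i => decide (a ≤ i)) = [] := by
      rw [List.filter_eq_nil_iff]
      intro x hx
      have := (PySem.List.mem_pyRange_one).1 hx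
      simp; omega
    have h2 : (PySem.List.pyRange a b 1).filter (fun i => decide (a ≤ i)) = PySem.List.pyRange a b 1 := by
      rw [List.filter_eq_self]
      intro x hx
      have := (PySem.List.mem_pyRange_one).1 hx
      simp; omega
    rw [h1, h2, List.nil_append]
  · rw [PySem.List.pyRange_one_eq_nil (show b ≤ a by omega), List.filter_eq_nil_iff]
    intro x hx
    have := (PySem.List.mem_pyRange_one).1 hx
    simp; omega

-- range(0,b) filtered to i ≤ c is range(0,c+1)
theorem pv_filter_le (c b : Int) (h : c + 1 ≤ b) :
    (PySem.List.pyRange 0 b 1).filter (fun i => decide (i ≤ c)) = PySem.List.pyRange 0 (c + 1) 1 := by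
  by_cases h0 : 0 ≤ c + 1
  · rw [PySem.List.pyRange_one_append 0 (c+1) b h0 h, List.filter_append]
    have h1 : (PySem.List.pyRange 0 (c+1) 1).filter (fun i => decide (i ≤ c)) = PySem.List.pyRange 0 (c+1) 1 := by
      rw [List.filter_eq_self]
      intro x hx
      have := (PySem.List.mem_pyRange_one).1 hx
      simp; omega
    have h2 : (PySem.List.pyRange (c+1) b 1).filter (fun i => decide (i ≤ c)) = [] := by
      rw [List.filter_eq_nil_iff]
      intro x hx
      have := (PySem.List.mem_pyRange_one).1 hx
      simp; omega
    rw [h1, h2, List.append_nil]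
  · rw [PySem.List.pyRange_one_eq_nil (show c + 1 ≤ (0:Int) by omega), List.filter_eq_nil_iff]
    intro x hx
    have := (PySem.List.mem_pyRange_one).1 hx
    simp; omega

-- B's selectable-index list is the filtered index range
theorem pv_sel_eq (items : List (String × String × String)) :
    ((PySem.List.enumerate items 0).filter (fun e => !(pvIsSection e.2))).map (fun e => e.1)
      = (PySem.List.pyRange 0 (items.length : Int) 1).filter
          (fun i => !(pvIsSection (PySem.List.pyGetD items i ("", "", "")))) := by
  rw [PySem.List.enumerate_eq_map_pyRange (d := ("", "", ""))]
  rw [List.filter_map, List.map_map]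
  simp [Function.comp_def]

-- ===== VERDICT (by name: the statement is the Claim_ definition above) =====
theorem settings_next_selectable_index_py_spec : Claim_equal_settings_next_selectable_index_py := by
  intro items start direction _
  unfold Spec_settings_next_selectable_index_py
  unfold settings_next_selectable_index_py settings_next_selectable_index_py_alt
  by_cases hnil : items = []
  · simp [hnil]
  · simp only [if_neg hnil]
    have hlen : 1 ≤ (items.length : Int) := by
      have : items.length ≠ 0 := fun h => hnil (List.eq_nil_of_length_eq_zero h)
      omega
    set p := (fun i => !(pvIsSection (PySem.List.pyGetD items i ("", "", "")))) with hp
    set idx : Int := max 0 (min start ((items.length : Int) - 1)) with hidx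
    have hidx0 : 0 ≤ idx := le_max_left _ _
    have hidxn : idx < (items.length : Int) := by
      have := min_le_right start ((items.length : Int) - 1)
      omega
    rw [pv_sel_eq items]
    set sel := (PySem.List.pyRange 0 (items.length : Int) 1).filter p with hsel
    have hselhead : sel.head? = (PySem.List.pyRange 0 (items.length : Int) 1).find? p :=
      (pv_find?_eq_head?_filter p _).symm
    by_cases hd : direction ≥ 0
    · -- forward
      simp only [if_pos hd]
      rw [pvLoopA_forward items (items.length + 1) idx hidx0 (by push_cast; omega)]
      have hafter : sel.filter (fun i => decide (idx ≤ i))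
          = (PySem.List.pyRange idx (items.length : Int) 1).filter p := by
        rw [hsel, List.filter_filter, ← pv_filter_ge idx (items.length : Int) hidx0,
            List.filter_filter]
        congr 1
        funext x
        exact Bool.and_comm _ _
      cases hfind : (PySem.List.pyRange idx (items.length : Int) 1).find? p with
      | some c =>
        have hsome : (sel.filter (fun i => decide (idx ≤ i))).head? = some c := by
          rw [hafter, ← pv_find?_eq_head?_filter, hfind]
        have hselne : ¬ sel = [] := by
          intro h
          rw [h] at hsome; simp at hsome
        simp only [if_neg hselne, hsome]
      | none =>
        have hnone : (sel.filter (fun i => decide (idx ≤ i))).head? = none := by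
          rw [hafter, ← pv_find?_eq_head?_filter, hfind]
        simp only [show (1:Int) > 0 by norm_num, if_pos]
        cases hfull : (PySem.List.pyRange 0 (items.length : Int) 1).find? p with
        | some i =>
          have hselne : ¬ sel = [] := by
            intro h
            rw [h] at hselhead; rw [hfull] at hselhead; simp at hselhead
          have : sel.headD 0 = i := by
            rw [List.headD_eq_head?_getD, hselhead, hfull]; rfl
          simp only [if_neg hselne, hnone, this]
        | none =>
          have hselnil : sel = [] := by
            rw [hsel, List.filter_eq_nil_iff]
            intro x hx
            have := List.find?_eq_none.1 hfull x hx
            simpa using this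
          simp [hselnil]
    · -- backward
      simp only [if_neg hd]
      rw [pvLoopA_backward items (items.length + 1) idx hidxn (by push_cast; omega)]
      rw [PySem.List.pyRange_neg_one_eq_reverse idx (-1)]
      have hbefore : sel.filter (fun i => decide (i ≤ idx))
          = (PySem.List.pyRange 0 (idx + 1) 1).filter p := by
        rw [hsel, List.filter_filter, ← pv_filter_le idx (items.length : Int) (by omega),
            List.filter_filter]
        congr 1
        funext x
        exact Bool.and_comm _ _
      have hrev : ∀ (l : List Int), (l.reverse).find? p = (l.filter p).getLast? := by
        intro l
        rw [pv_find?_eq_head?_filter, List.filter_reverse, List.head?_reverse]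
      have hfullrev : PySem.List.pyRange ((items.length : Int) - 1) (-1) (-1)
          = (PySem.List.pyRange 0 (items.length : Int) 1).reverse := by
        rw [PySem.List.pyRange_neg_one_eq_reverse]
        norm_num
      have hng : ¬ ((-1:Int) > 0) := by norm_num
      cases hfind : ((PySem.List.pyRange 0 (idx + 1) 1).filter p).getLast? with
      | some c =>
        have hloop : ((PySem.List.pyRange 0 (idx + 1) 1).reverse).find? p = some c := by
          rw [hrev, hfind]
        have hsome : (sel.filter (fun i => decide (i ≤ idx))).getLast? = some c := by
          rw [hbefore, hfind]
        have hselne : ¬ sel = [] := by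
          intro h
          rw [h] at hsome; simp at hsome
        rw [show (-1:Int) + 1 = 0 by norm_num, ← hp]
        simp only [if_neg hselne, hloop, hsome]
      | none =>
        have hloop : ((PySem.List.pyRange 0 (idx + 1) 1).reverse).find? p = none := by
          rw [hrev, hfind]
        have hnone : (sel.filter (fun i => decide (i ≤ idx))).getLast? = none := by
          rw [hbefore, hfind]
        rw [show (-1:Int) + 1 = 0 by norm_num, ← hp]
        simp only [hloop, if_neg hng]
        rw [hfullrev]
        cases hfull : ((PySem.List.pyRange 0 (items.length : Int) 1).filter p).getLast? with
        | some i =>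
          have hfr : ((PySem.List.pyRange 0 (items.length : Int) 1).reverse).find? p = some i := by
            rw [hrev, hfull]
          have hselne : ¬ sel = [] := by
            intro h
            rw [hsel] at h; rw [h] at hfull; simp at hfull
          have : sel.getLastD 0 = i := by
            rw [List.getLastD_eq_getLast?, hsel, hfull]; rfl
          simp only [if_neg hselne, hnone, hfr, this]
        | none =>
          have hfr : ((PySem.List.pyRange 0 (items.length : Int) 1).reverse).find? p = none := by
            rw [hrev, hfull]
          have hselnil : sel = [] := by
            rw [hsel]
            exact List.getLast?_eq_none_iff.1 hfull
          simp [hselnil, hfr]
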